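-- pv_equiv track=rewrite | github.com/GBisi/GioEnv | microbit.py | get_microbit_name
-- ===== SOURCE A (Python) =====
-- def get_microbit_name(serial_number):
--     n = int(serial_number)
--     name_len = 5
--     code_letters = 5
--     codebook = [
--         ['z', 'v', 'g', 'p', 't'],
--         ['u', 'o', 'i', 'e', 'a'],
--         ['z', 'v', 'g', 'p', 't'],
--         ['u', 'o', 'i', 'e', 'a'],
--         ['z', 'v', 'g', 'p', 't']
--     ]
--
--     ld = 1
--     d = code_letters
--     name = ""
--
--     for i in range(name_len):
--         h = int((n % d) / ld);
--         n -= h;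
--         d *= code_letters;
--         ld *= code_letters;
--         name = codebook[i][h] + name
--
--     return name
-- ===== SOURCE B (Python) =====
-- def get_microbit_name(serial_number):
--     def encode(n, alphabets):
--         if not alphabets:
--             return ""
--         head, *rest = alphabets
--         q, r = divmod(n, 5 ** len(rest))
--         return head[q % 5] + encode(r, rest)
--     return encode(int(serial_number) % 3125,
--                   ["zvgpt", "uoiea", "zvgpt", "uoiea", "zvgpt"])
-- ===== Notes on version B (the rewrite author's own statement) =====
-- stated objective: alternative
-- what changed: Replaces A's iterative least-significant-first loop (running divisors d/ld, n -= h subtraction, string built by prepending) with a recursive most-significant-first encoder: n is reduced once to its five-digit base-5 remainder, then divmod splits off the leading digit at each recursion step over the list of alphabets, building the string front-to-back.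
import Mathlib
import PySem

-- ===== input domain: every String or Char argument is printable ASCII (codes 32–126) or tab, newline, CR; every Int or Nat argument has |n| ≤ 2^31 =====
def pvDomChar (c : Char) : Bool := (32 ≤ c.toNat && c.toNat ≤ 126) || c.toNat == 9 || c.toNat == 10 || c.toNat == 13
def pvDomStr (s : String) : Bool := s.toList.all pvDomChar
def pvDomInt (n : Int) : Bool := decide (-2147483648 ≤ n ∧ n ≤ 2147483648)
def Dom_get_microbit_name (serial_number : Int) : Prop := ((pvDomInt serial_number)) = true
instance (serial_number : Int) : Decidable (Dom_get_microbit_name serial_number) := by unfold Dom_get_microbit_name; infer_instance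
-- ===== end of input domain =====

-- B replaces A's iterative least-significant-first loop (running divisors, n -= h,
-- prepending) with a most-significant-first divmod recursion over the alphabet list;
-- objective: alternative decomposition, same cost.

-- ===== PORT A =====
-- the name is built as a List Char (prepend = Python's 'codebook[i][h] + name'); String.mk at the end
def pvCodebook : List (List Char) :=
  [['z', 'v', 'g', 'p', 't'],
   ['u', 'o', 'i', 'e', 'a'],
   ['z', 'v', 'g', 'p', 't'],
   ['u', 'o', 'i', 'e', 'a'],
   ['z', 'v', 'g', 'p', 't']]

def get_microbit_name (serial_number : Int) : String :=
  let n := serial_number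
  -- h = int((n % d) / ld): exact as floor division here, since 0 ≤ n % d < d ≤ 5^5
  -- keeps the float quotient exact and nonnegative, so int() truncation = floor
  let st :=
    (PySem.List.pyRange 0 5 1).foldl
      (fun (st : Int × Int × Int × List Char) (i : Int) =>
        let n := st.1; let d := st.2.1; let ld := st.2.2.1; let name := st.2.2.2
        let h := PySem.Int.floordiv (PySem.Int.mod n d) ld
        (n - h, d * 5, ld * 5,
          PySem.List.pyGetD (PySem.List.pyGetD pvCodebook i []) h ' ' :: name))
      (n, 5, 1, ([] : List Char))
  String.mk st.2.2.2

-- ===== PORT B =====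
-- encode(n, alphabets): divmod splits off the leading base-5 digit at each step
def pvEnc (n : Int) (alphabets : List (List Char)) : List Char :=
  match alphabets with
  | [] => []
  | head :: rest =>
    let q := PySem.Int.floordiv n ((5 : Int) ^ rest.length)
    let r := PySem.Int.mod n ((5 : Int) ^ rest.length)
    PySem.List.pyGetD head (PySem.Int.mod q 5) ' ' :: pvEnc r rest

def get_microbit_name_alt (serial_number : Int) : String :=
  String.mk (pvEnc (PySem.Int.mod serial_number 3125)
    [['z','v','g','p','t'], ['u','o','i','e','a'], ['z','v','g','p','t'],
     ['u','o','i','e','a'], ['z','v','g','p','t']])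

-- ===== PRECONDITION & SPEC =====
def Spec_get_microbit_name (serial_number : Int) (out : String) : Prop := out = get_microbit_name_alt serial_number
instance (serial_number : Int) (out : String) : Decidable (Spec_get_microbit_name serial_number out) := by unfold Spec_get_microbit_name; infer_instance

-- ===== CLAIM (what is proved, stated in full; the proofs are below) =====
def Claim_equal_get_microbit_name : Prop := ∀ (serial_number : Int), Dom_get_microbit_name serial_number → Spec_get_microbit_name serial_number (get_microbit_name serial_number)

-- ===== LEMMAS AND PROOFS =====

-- A's running state subtracts the raw digits from n; these lemmas flatten each of A's
-- digit expressions into the direct base-5 digit n / 5^k % 5.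
theorem pvDigit1 (n : Int) : (n - n % 5) % 25 / 5 = n / 5 % 5 := by
  have a1 : n % 25 = n % 5 + 5 * (n / 5 % 5) := by omega
  omega

theorem pvDigit2 (n : Int) : (n - n % 5 - n / 5 % 5) % 125 / 25 = n / 25 % 5 := by
  have a1 : n % 25 = n % 5 + 5 * (n / 5 % 5) := by omega
  have a2 : n % 125 = n % 25 + 25 * (n / 25 % 5) := by omega
  have b2 : (n - n % 5 - n / 5 % 5) % 125 = n % 125 - n % 5 - n / 5 % 5 := by omega
  omega

theorem pvDigit3 (n : Int) : (n - n % 5 - n / 5 % 5 - n / 25 % 5) % 625 / 125 = n / 125 % 5 := by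
  have a1 : n % 25 = n % 5 + 5 * (n / 5 % 5) := by omega
  have a2 : n % 125 = n % 25 + 25 * (n / 25 % 5) := by omega
  have a3 : n % 625 = n % 125 + 125 * (n / 125 % 5) := by omega
  have b3 : (n - n % 5 - n / 5 % 5 - n / 25 % 5) % 625 = n % 625 - n % 5 - n / 5 % 5 - n / 25 % 5 := by omega
  omega

theorem pvDigit4 (n : Int) :
    (n - n % 5 - n / 5 % 5 - n / 25 % 5 - n / 125 % 5) % 3125 / 625 = n / 625 % 5 := by
  have a1 : n % 25 = n % 5 + 5 * (n / 5 % 5) := by omega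
  have a2 : n % 125 = n % 25 + 25 * (n / 25 % 5) := by omega
  have a3 : n % 625 = n % 125 + 125 * (n / 125 % 5) := by omega
  have a4 : n % 3125 = n % 625 + 625 * (n / 625 % 5) := by omega
  have b4 : (n - n % 5 - n / 5 % 5 - n / 25 % 5 - n / 125 % 5) % 3125
      = n % 3125 - n % 5 - n / 5 % 5 - n / 25 % 5 - n / 125 % 5 := by omega
  omega

-- B's recursion quotients the running remainder; these flatten each B digit/remainder
-- to the same normal form n / 5^k % 5 (and the remainder chain to n % 5^k).
theorem pvB0 (n : Int) : n % 3125 / 625 % 5 = n / 625 % 5 := by omega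
theorem pvB1 (n : Int) : n % 3125 % 625 / 125 % 5 = n / 125 % 5 := by omega
theorem pvB2 (n : Int) : n % 3125 % 625 % 125 / 25 % 5 = n / 25 % 5 := by omega
theorem pvB3 (n : Int) : n % 3125 % 625 % 125 % 25 / 5 % 5 = n / 5 % 5 := by omega
theorem pvB4 (n : Int) : n % 3125 % 625 % 125 % 25 % 5 / 1 % 5 = n % 5 := by omega

-- ===== VERDICT (by name: the statement is the Claim_ definition above) =====
theorem get_microbit_name_spec : Claim_equal_get_microbit_name := by
  intro n _
  show get_microbit_name n = get_microbit_name_alt n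
  have r5 : PySem.List.pyRange 0 5 1 = [0, 1, 2, 3, 4] := by decide
  have hm : ∀ (a b : Int), 0 < b → PySem.Int.mod a b = a % b :=
    fun a b h => PySem.Int.mod_eq_emod_of_pos h
  have hd : ∀ (a b : Int), 0 < b → PySem.Int.floordiv a b = a / b :=
    fun a b h => PySem.Int.floordiv_eq_ediv_of_pos h
  simp only [get_microbit_name, get_microbit_name_alt, pvEnc, r5, List.foldl,
    List.length_cons, List.length_nil,
    hm _ 5 (by norm_num), hm _ 25 (by norm_num), hm _ 125 (by norm_num),
    hm _ 625 (by norm_num), hm _ 3125 (by norm_num),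
    hd _ 1 (by norm_num), hd _ 5 (by norm_num), hd _ 25 (by norm_num),
    hd _ 125 (by norm_num), hd _ 625 (by norm_num), Int.reduceMul, pow_succ, pow_zero,
    one_mul]
  rw [show ∀ m : Int, m % 5 / 1 = m % 5 from fun m => by omega,
    pvDigit1 n, pvDigit2 n, pvDigit3 n, pvDigit4 n,
    pvB0 n, pvB1 n, pvB2 n, pvB3 n, pvB4 n]
  rw [show PySem.List.pyGetD pvCodebook 0 [] = ['z', 'v', 'g', 'p', 't'] from by decide,
    show PySem.List.pyGetD pvCodebook 1 [] = ['u', 'o', 'i', 'e', 'a'] from by decide,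
    show PySem.List.pyGetD pvCodebook 2 [] = ['z', 'v', 'g', 'p', 't'] from by decide,
    show PySem.List.pyGetD pvCodebook 3 [] = ['u', 'o', 'i', 'e', 'a'] from by decide,
    show PySem.List.pyGetD pvCodebook 4 [] = ['z', 'v', 'g', 'p', 't'] from by decide]
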